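-- pv_equiv track=rewrite | github.com/zaheerkhan4077/YTBNICHES | app.py | parse_iso8601_duration
-- ===== SOURCE A (Python) =====
-- def parse_iso8601_duration(duration_str: str) -> str:
--     if not duration_str:
--         return ""
--     s = duration_str.upper().replace("PT", "")
--     hours = mins = secs = 0
--     num = ""
--     for ch in s:
--         if ch.isdigit():
--             num += ch
--         else:
--             if ch == "H":
--                 hours = int(num) if num else 0
--             elif ch == "M":
--                 mins = int(num) if num else 0
--             elif ch == "S":
--                 secs = int(num) if num else 0
--             num = ""
--     if hours > 0:
--         return f"{hours}:{mins:02d}:{secs:02d}"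
--     return f"{mins}:{secs:02d}"
-- ===== SOURCE B (Python) =====
-- def parse_iso8601_duration(duration_str: str) -> str:
--     if not duration_str:
--         return ""
--     s = duration_str.upper().replace("PT", "")
--
--     def last_value(unit):
--         # value of a unit = digit run immediately before its LAST occurrence
--         for i in range(len(s) - 1, -1, -1):
--             if s[i] == unit:
--                 j = i
--                 while j > 0 and s[j - 1].isdigit():
--                     j -= 1
--                 return int(s[j:i]) if j < i else 0
--         return 0
--
--     hours, mins, secs = last_value("H"), last_value("M"), last_value("S")
--     if hours > 0:
--         return f"{hours}:{mins:02d}:{secs:02d}"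
--     return f"{mins}:{secs:02d}"
-- ===== Notes on version B (the rewrite author's own statement) =====
-- stated objective: alternative
-- what changed: Replaces the left-to-right character state machine (digit accumulator mutated per char, last assignment winning) by three independent right-to-left searches: each unit's value is the digit run immediately preceding the last occurrence of its letter.
import Mathlib
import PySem

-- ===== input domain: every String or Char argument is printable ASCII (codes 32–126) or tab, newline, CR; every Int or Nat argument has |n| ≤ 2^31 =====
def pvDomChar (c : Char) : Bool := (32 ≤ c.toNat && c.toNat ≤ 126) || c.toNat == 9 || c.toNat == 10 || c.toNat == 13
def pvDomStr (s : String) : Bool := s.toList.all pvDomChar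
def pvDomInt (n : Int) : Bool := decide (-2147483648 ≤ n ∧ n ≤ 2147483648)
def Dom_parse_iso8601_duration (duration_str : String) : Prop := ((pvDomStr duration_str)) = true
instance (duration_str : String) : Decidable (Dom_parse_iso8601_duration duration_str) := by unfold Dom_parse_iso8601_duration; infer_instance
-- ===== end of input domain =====

-- B replaces A's left-to-right state machine by per-unit searches for the last occurrence
-- of each unit letter and the digit run before it; same return value, same cost (alternative).

-- Python's f"{n:02d}" for the nonnegative values produced here (exact on this use).
def pvPad2 (n : Int) : String :=
  let t := PySem.Int.toStr n
  if t.length < 2 then "0" ++ t else t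

-- ===== PORT A =====
-- int(num) if num else 0   (num is a run of ASCII digits, so int(num) never fails)
def pvToIntD (num : List Char) : Int :=
  if num = [] then 0 else (PySem.Int.ofChars? num).getD 0

-- one iteration of A's for-loop, state (hours, mins, secs, num)
def pvStepA (st : Int × Int × Int × List Char) (ch : Char) : Int × Int × Int × List Char :=
  match st with
  | (hours, mins, secs, num) =>
    if PySem.Chars.isdigit ch then (hours, mins, secs, num ++ [ch])
    else
      if ch = 'H' then (pvToIntD num, mins, secs, [])
      else if ch = 'M' then (hours, pvToIntD num, secs, [])
      else if ch = 'S' then (hours, mins, pvToIntD num, [])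
      else (hours, mins, secs, [])

def parse_iso8601_duration (duration_str : String) : String :=
  if duration_str = "" then ""
  else
    let l := (PySem.Str.replace (PySem.Str.upper duration_str) "PT" "").toList
    let st := l.foldl pvStepA (0, 0, 0, [])
    if st.1 > 0 then
      PySem.Int.toStr st.1 ++ ":" ++ pvPad2 st.2.1 ++ ":" ++ pvPad2 st.2.2.1
    else
      PySem.Int.toStr st.2.1 ++ ":" ++ pvPad2 st.2.2.1

-- ===== PORT B =====
-- Source B's 'for i in range(len(s)-1, -1, -1): if s[i] == unit: …' : try indices n-1, …, 0
def pvSearchLast (l : List Char) (u : Char) : Nat → Option Nat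
  | 0 => none
  | i + 1 => if l[i]? = some u then some i else pvSearchLast l u i

-- Source B's 'while j > 0 and s[j-1].isdigit(): j -= 1'
def pvRunStart (l : List Char) : Nat → Nat
  | 0 => 0
  | j + 1 =>
    match l[j]? with
    | some c => if PySem.Chars.isdigit c then pvRunStart l j else j + 1
    | none => j + 1

-- Source B's last_value(unit); the slice s[j:i] has 0 ≤ j ≤ i ≤ len(s), so drop/take is exact
def pvLastValue (l : List Char) (u : Char) : Int :=
  match pvSearchLast l u l.length with
  | none => 0
  | some i =>
    let j := pvRunStart l i
    if j < i then (PySem.Int.ofChars? ((l.drop j).take (i - j))).getD 0 else 0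

def parse_iso8601_duration_alt (duration_str : String) : String :=
  if duration_str = "" then ""
  else
    let l := (PySem.Str.replace (PySem.Str.upper duration_str) "PT" "").toList
    let hours := pvLastValue l 'H'
    let mins := pvLastValue l 'M'
    let secs := pvLastValue l 'S'
    if hours > 0 then
      PySem.Int.toStr hours ++ ":" ++ pvPad2 mins ++ ":" ++ pvPad2 secs
    else
      PySem.Int.toStr mins ++ ":" ++ pvPad2 secs

-- ===== PRECONDITION & SPEC =====
def Spec_parse_iso8601_duration (duration_str : String) (out : String) : Prop := out = parse_iso8601_duration_alt duration_str
instance (duration_str : String) (out : String) : Decidable (Spec_parse_iso8601_duration duration_str out) := by unfold Spec_parse_iso8601_duration; infer_instance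

-- ===== CLAIM (what is proved, stated in full; the proofs are below) =====
def Claim_equal_parse_iso8601_duration : Prop := ∀ (duration_str : String), Dom_parse_iso8601_duration duration_str → Spec_parse_iso8601_duration duration_str (parse_iso8601_duration duration_str)

-- ===== LEMMAS AND PROOFS =====

-- what the value of unit u becomes after A processes t starting with pending digits num
def pvCom (u : Char) (t num : List Char) (init : Int) : Int :=
  if u ∈ t then pvLastValue (num ++ t) u else init

theorem pvSearchLast_none_iff (l : List Char) (u : Char) :
    ∀ n, pvSearchLast l u n = none ↔ ∀ i < n, l[i]? ≠ some u := by
  intro n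
  induction n with
  | zero => simp [pvSearchLast]
  | succ m ih =>
    simp only [pvSearchLast]
    by_cases h : l[m]? = some u
    · simp only [h]
      constructor
      · intro hc; exact absurd hc (by simp)
      · intro hall; exact absurd h (hall m (Nat.lt_succ_self m))
    · simp only [if_neg h, ih]
      constructor
      · intro hall i hi
        rcases Nat.lt_succ_iff_lt_or_eq.mp hi with h1 | h1
        · exact hall i h1
        · subst h1; exact h
      · intro hall i hi; exact hall i (Nat.lt_succ_of_lt hi)

theorem pvSearchLast_spec (l : List Char) (u : Char) :
    ∀ n i, pvSearchLast l u n = some i →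
      i < n ∧ l[i]? = some u ∧ ∀ k, i < k → k < n → l[k]? ≠ some u := by
  intro n
  induction n with
  | zero => intro i h; simp [pvSearchLast] at h
  | succ m ih =>
    intro i h
    simp only [pvSearchLast] at h
    by_cases hm : l[m]? = some u
    · rw [if_pos hm] at h
      obtain rfl : m = i := Option.some.inj h
      exact ⟨Nat.lt_succ_self m, hm, fun k hk1 hk2 => absurd hk2 (by omega)⟩
    · rw [if_neg hm] at h
      obtain ⟨h1, h2, h3⟩ := ih i h
      refine ⟨Nat.lt_succ_of_lt h1, h2, fun k hk1 hk2 => ?_⟩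
      rcases Nat.lt_succ_iff_lt_or_eq.mp hk2 with hh | hh
      · exact h3 k hk1 hh
      · subst hh; exact hm

theorem pvSearchLast_eq_some (l : List Char) (u : Char) :
    ∀ n i, i < n → l[i]? = some u → (∀ k, i < k → k < n → l[k]? ≠ some u) →
      pvSearchLast l u n = some i := by
  intro n
  induction n with
  | zero => intro i h; omega
  | succ m ih =>
    intro i hi hget habove
    simp only [pvSearchLast]
    by_cases hm : l[m]? = some u
    · rw [if_pos hm]
      rcases Nat.lt_succ_iff_lt_or_eq.mp hi with hh | hh
      · exact absurd hm (habove m hh (Nat.lt_succ_self m))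
      · rw [hh]
    · rw [if_neg hm]
      have hi' : i < m := by
        rcases Nat.lt_succ_iff_lt_or_eq.mp hi with hh | hh
        · exact hh
        · subst hh; exact absurd hget hm
      exact ih i hi' hget (fun k hk1 hk2 => habove k hk1 (Nat.lt_succ_of_lt hk2))

theorem pvRunStart_succ (l : List Char) (j : Nat) :
    pvRunStart l (j + 1) =
      (match l[j]? with
       | some c => if PySem.Chars.isdigit c then pvRunStart l j else j + 1
       | none => j + 1) := rfl

theorem pvRunStart_shift (pre t : List Char) (c : Char)
    (hc : PySem.Chars.isdigit c = false) :
    ∀ i, pvRunStart (pre ++ c :: t) (pre.length + 1 + i) = pre.length + 1 + pvRunStart t i := by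
  intro i
  induction i with
  | zero =>
    have : pre.length + 1 + 0 = pre.length + 1 := rfl
    rw [this]
    show pvRunStart (pre ++ c :: t) (pre.length + 1) = pre.length + 1
    have hget : (pre ++ c :: t)[pre.length]? = some c := by
      simp
    simp [pvRunStart, hc]
  | succ j ih =>
    have harith : pre.length + 1 + (j + 1) = (pre.length + 1 + j) + 1 := by omega
    rw [harith]
    have hget : (pre ++ c :: t)[pre.length + 1 + j]? = t[j]? := by
      rw [List.getElem?_append_right (by omega),
        show pre.length + 1 + j - pre.length = j + 1 by omega, List.getElem?_cons_succ]
    show pvRunStart (pre ++ c :: t) ((pre.length + 1 + j) + 1) = pre.length + 1 + pvRunStart t (j + 1)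
    rw [pvRunStart_succ, pvRunStart_succ, hget]
    cases ht : t[j]? with
    | none => simp; omega
    | some d =>
      by_cases hd : PySem.Chars.isdigit d
      · simp [hd, ih]
      · simp [hd]; omega

theorem pvRunStart_digits (num rest : List Char)
    (hd : ∀ x ∈ num, PySem.Chars.isdigit x = true) :
    ∀ j, j ≤ num.length → pvRunStart (num ++ rest) j = 0 := by
  intro j
  induction j with
  | zero => intro _; rfl
  | succ k ih =>
    intro hk
    have hklt : k < num.length := by omega
    have hget : (num ++ rest)[k]? = some num[k] := by
      rw [List.getElem?_append_left hklt]
      simp [hklt]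
    have hdig : PySem.Chars.isdigit num[k] = true := hd _ (List.getElem_mem hklt)
    rw [pvRunStart_succ, hget]
    simp only [hdig]
    exact ih (by omega)

theorem pvLastValue_notmem (l : List Char) (u : Char) (h : u ∉ l) : pvLastValue l u = 0 := by
  have hn : pvSearchLast l u l.length = none := by
    rw [pvSearchLast_none_iff]
    intro i hi hget
    exact h (List.mem_of_getElem? hget)
  simp [pvLastValue, hn]

theorem pvLastValue_skip (pre t : List Char) (c u : Char)
    (hc : PySem.Chars.isdigit c = false) (hu : u ∈ t) :
    pvLastValue (pre ++ c :: t) u = pvLastValue t u := by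
  obtain ⟨k, hklt, hkeq⟩ := List.mem_iff_getElem.mp hu
  obtain ⟨i, hi⟩ : ∃ i, pvSearchLast t u t.length = some i := by
    cases hs : pvSearchLast t u t.length with
    | some i => exact ⟨i, rfl⟩
    | none =>
      rw [pvSearchLast_none_iff] at hs
      exact absurd (by rw [List.getElem?_eq_getElem hklt, hkeq]) (hs k hklt)
  obtain ⟨hilt, higet, hiabove⟩ := pvSearchLast_spec t u t.length i hi
  have hlen : (pre ++ c :: t).length = pre.length + 1 + t.length := by simp; omega
  have hget : ∀ m, (pre ++ c :: t)[pre.length + 1 + m]? = t[m]? := by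
    intro m
    rw [List.getElem?_append_right (by omega),
      show pre.length + 1 + m - pre.length = m + 1 by omega, List.getElem?_cons_succ]
  have hbig : pvSearchLast (pre ++ c :: t) u (pre ++ c :: t).length
      = some (pre.length + 1 + i) := by
    apply pvSearchLast_eq_some
    · rw [hlen]; omega
    · rw [hget i]; exact higet
    · intro k2 hk1 hk2
      rw [hlen] at hk2
      rw [show k2 = pre.length + 1 + (k2 - pre.length - 1) by omega, hget]
      exact hiabove _ (by omega) (by omega)
  simp only [pvLastValue, hbig, hi]
  rw [pvRunStart_shift pre t c hc i]
  have hdrop : (pre ++ c :: t).drop (pre.length + 1 + pvRunStart t i)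
      = t.drop (pvRunStart t i) := by
    rw [show pre ++ c :: t = (pre ++ [c]) ++ t by simp,
      show pre.length + 1 + pvRunStart t i = (pre ++ [c]).length + pvRunStart t i by simp]
    rw [List.drop_append]
    have h1 : List.drop ((pre ++ [c]).length + pvRunStart t i) (pre ++ [c]) = [] :=
      List.drop_eq_nil_of_le (by simp)
    rw [h1, List.nil_append,
      show (pre ++ [c]).length + pvRunStart t i - (pre ++ [c]).length = pvRunStart t i
        by omega]
  rw [show pre.length + 1 + i - (pre.length + 1 + pvRunStart t i) = i - pvRunStart t i
      by omega, hdrop]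
  by_cases hlt : pvRunStart t i < i
  · rw [if_pos (by omega), if_pos hlt]
  · rw [if_neg (by omega), if_neg hlt]

theorem pvLastValue_hit (num t : List Char) (u : Char)
    (hd : ∀ x ∈ num, PySem.Chars.isdigit x = true)
    (hu : PySem.Chars.isdigit u = false) (hut : u ∉ t) :
    pvLastValue (num ++ u :: t) u = pvToIntD num := by
  have hget : ∀ m, (num ++ u :: t)[num.length + m]? = (u :: t)[m]? := by
    intro m
    rw [List.getElem?_append_right (by omega), show num.length + m - num.length = m by omega]
  have hbig : pvSearchLast (num ++ u :: t) u (num ++ u :: t).length = some num.length := by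
    apply pvSearchLast_eq_some
    · simp
    · rw [show num.length = num.length + 0 by omega, hget]; rfl
    · intro k hk1 hk2
      simp only [List.length_append, List.length_cons] at hk2
      rw [show k = num.length + (k - num.length - 1 + 1) by omega, hget,
        List.getElem?_cons_succ]
      intro hcon
      exact hut (List.mem_of_getElem? hcon)
  simp only [pvLastValue, hbig]
  rw [pvRunStart_digits num (u :: t) hd num.length le_rfl]
  by_cases hnil : num = []
  · subst hnil; simp [pvToIntD]
  · have hpos : 0 < num.length := List.length_pos_of_ne_nil hnil
    rw [if_pos hpos, Nat.sub_zero, List.drop_zero, List.take_left]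
    simp [pvToIntD, hnil]

theorem pvStepA_nondigit (h m s : Int) (num : List Char) (c : Char)
    (hc : PySem.Chars.isdigit c = false) :
    pvStepA (h, m, s, num) c =
      ((if c = 'H' then pvToIntD num else h),
       (if c = 'M' then pvToIntD num else m),
       (if c = 'S' then pvToIntD num else s), []) := by
  simp only [pvStepA, hc, Bool.false_eq_true, if_false]
  split_ifs <;> simp_all

theorem pvCom_cons_nondigit (u c : Char) (t num : List Char)
    (hud : PySem.Chars.isdigit u = false) (hc : PySem.Chars.isdigit c = false)
    (hnum : ∀ x ∈ num, PySem.Chars.isdigit x = true) (init : Int) :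
    pvCom u t [] (if c = u then pvToIntD num else init) = pvCom u (c :: t) num init := by
  by_cases hmem : u ∈ t
  · have hmem' : u ∈ c :: t := List.mem_cons_of_mem _ hmem
    simp only [pvCom, if_pos hmem, if_pos hmem', List.nil_append]
    rw [pvLastValue_skip num t c u hc hmem]
  · by_cases hcu : c = u
    · subst hcu
      have hmem' : c ∈ c :: t := List.mem_cons_self
      simp only [pvCom, if_neg hmem, if_pos hmem']
      rw [pvLastValue_hit num t c hnum hud hmem]
      simp
    · have hmem' : u ∉ c :: t := by
        intro hcon
        rcases List.mem_cons.mp hcon with h1 | h1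
        · exact hcu h1.symm
        · exact hmem h1
      simp only [pvCom, if_neg hmem, if_neg hmem', if_neg hcu]

theorem pvFoldA_com (t : List Char) : ∀ (num : List Char) (h m s : Int),
    (∀ x ∈ num, PySem.Chars.isdigit x = true) →
    (List.foldl pvStepA (h, m, s, num) t).1 = pvCom 'H' t num h ∧
    (List.foldl pvStepA (h, m, s, num) t).2.1 = pvCom 'M' t num m ∧
    (List.foldl pvStepA (h, m, s, num) t).2.2.1 = pvCom 'S' t num s := by
  induction t with
  | nil => intro num h m s _; simp [pvCom]
  | cons c t ih =>
    intro num h m s hnum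
    rw [List.foldl_cons]
    by_cases hd : PySem.Chars.isdigit c
    · have hstep : pvStepA (h, m, s, num) c = (h, m, s, num ++ [c]) := by
        simp [pvStepA, hd]
      rw [hstep]
      obtain ⟨e1, e2, e3⟩ := ih (num ++ [c]) h m s (by
        intro x hx
        rcases List.mem_append.mp hx with h1 | h1
        · exact hnum x h1
        · rw [List.mem_singleton.mp h1]; exact hd)
      have hcom : ∀ (u : Char) (init : Int), PySem.Chars.isdigit u = false →
          pvCom u t (num ++ [c]) init = pvCom u (c :: t) num init := by
        intro u init hu'
        have hne : u ≠ c := by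
          intro he; rw [he, hd] at hu'; cases hu'
        have : (u ∈ c :: t) ↔ (u ∈ t) := by
          rw [List.mem_cons]
          exact ⟨fun hx => hx.resolve_left hne, Or.inr⟩
        simp only [pvCom, this, List.append_assoc, List.singleton_append]
      exact ⟨by rw [e1, hcom 'H' h (by decide)], by rw [e2, hcom 'M' m (by decide)],
        by rw [e3, hcom 'S' s (by decide)]⟩
    · have hcf : PySem.Chars.isdigit c = false := by
        revert hd; cases PySem.Chars.isdigit c <;> simp
      rw [pvStepA_nondigit h m s num c hcf]
      obtain ⟨e1, e2, e3⟩ := ih [] _ _ _ (by intro x hx; simp at hx)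
      exact ⟨by rw [e1, pvCom_cons_nondigit 'H' c t num (by decide) hcf hnum h],
        by rw [e2, pvCom_cons_nondigit 'M' c t num (by decide) hcf hnum m],
        by rw [e3, pvCom_cons_nondigit 'S' c t num (by decide) hcf hnum s]⟩

theorem pvCom_nil_zero (u : Char) (l : List Char) : pvCom u l [] 0 = pvLastValue l u := by
  by_cases h : u ∈ l
  · simp [pvCom, h]
  · simp [pvCom, h, pvLastValue_notmem l u h]

-- ===== VERDICT (by name: the statement is the Claim_ definition above) =====
theorem parse_iso8601_duration_spec : Claim_equal_parse_iso8601_duration := by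
  intro ds _
  unfold Spec_parse_iso8601_duration parse_iso8601_duration parse_iso8601_duration_alt
  by_cases h0 : ds = ""
  · simp [h0]
  · simp only [h0, if_false]
    obtain ⟨e1, e2, e3⟩ :=
      pvFoldA_com ((PySem.Str.replace (PySem.Str.upper ds) "PT" "").toList) [] 0 0 0
        (by intro x hx; simp at hx)
    rw [e1, e2, e3, pvCom_nil_zero, pvCom_nil_zero, pvCom_nil_zero]
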